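-- pv_equiv track=rewrite | github.com/Arjunheregeek/Connect | Pre_processing/new_processing.py | extract_domain_knowledge
-- ===== SOURCE A (Python) =====
-- def extract_domain_knowledge(experience_list, degrees):
--     """
--     Derive domain knowledge from work experience industries and education.
--     Returns list of domain areas.
--     """
--     domains = set()
--
--     # Extract from work experience industries
--     if experience_list and isinstance(experience_list, list):
--         for job in experience_list:
--             industry = job.get('company_industry')
--             if industry:
--                 industry_lower = industry.lower()
--
--                 # Map industries to domain knowledge areas
--                 if 'software' in industry_lower or 'technology' in industry_lower:
--                     domains.add('Technology')
--                 if 'financial' in industry_lower or 'bank' in industry_lower: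
--                     domains.add('FinTech')
--                 if 'healthcare' in industry_lower or 'medical' in industry_lower or 'pharma' in industry_lower:
--                     domains.add('Healthcare')
--                 if 'e-learning' in industry_lower or 'education' in industry_lower:
--                     domains.add('EdTech')
--                 if 'retail' in industry_lower or 'e-commerce' in industry_lower or 'consumer' in industry_lower:
--                     domains.add('E-commerce & Retail')
--                 if 'entertainment' in industry_lower or 'media' in industry_lower:
--                     domains.add('Media & Entertainment')
--                 if 'consulting' in industry_lower:
--                     domains.add('Consulting')
--                 if 'manufacturing' in industry_lower or 'industrial' in industry_lower:
--                     domains.add('Manufacturing')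
--
--     # Extract from education
--     if degrees and isinstance(degrees, list):
--         degrees_text = ' '.join([str(d).lower() for d in degrees])
--
--         if 'business' in degrees_text or 'mba' in degrees_text:
--             domains.add('Business Management')
--         if 'engineering' in degrees_text:
--             domains.add('Engineering')
--         if 'computer' in degrees_text or 'software' in degrees_text:
--             domains.add('Computer Science')
--         if 'data' in degrees_text or 'analytics' in degrees_text:
--             domains.add('Data Science')
--         if 'design' in degrees_text:
--             domains.add('Design')
--
--     return list(domains) if domains else ['General']
-- ===== SOURCE B (Python) =====
-- # Single sliding-window scan with a precomputed keyword set (multi-pattern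
-- # matcher) instead of many independent substring searches per text.
--
-- INDUSTRY_RULES = [
--     (('software', 'technology'), 'Technology'),
--     (('financial', 'bank'), 'FinTech'),
--     (('healthcare', 'medical', 'pharma'), 'Healthcare'),
--     (('e-learning', 'education'), 'EdTech'),
--     (('retail', 'e-commerce', 'consumer'), 'E-commerce & Retail'),
--     (('entertainment', 'media'), 'Media & Entertainment'),
--     (('consulting',), 'Consulting'),
--     (('manufacturing', 'industrial'), 'Manufacturing'),
-- ]
--
-- EDU_RULES = [
--     (('business', 'mba'), 'Business Management'),
--     (('engineering',), 'Engineering'),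
--     (('computer', 'software'), 'Computer Science'),
--     (('data', 'analytics'), 'Data Science'),
--     (('design',), 'Design'),
-- ]
--
--
-- def _keyword_index(rules):
--     kws = {k for pats, _ in rules for k in pats}
--     lengths = sorted({len(k) for k in kws})
--     return kws, lengths
--
--
-- _IND_KWS, _IND_LENS = _keyword_index(INDUSTRY_RULES)
-- _EDU_KWS, _EDU_LENS = _keyword_index(EDU_RULES)
--
--
-- def _scan(text, kws, lengths):
--     """Set of keywords occurring in text: one left-to-right pass, each window
--     looked up in the keyword hash set."""
--     return {w for i in range(len(text)) for L in lengths
--             for w in [text[i:i + L]] if w in kws}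
--
--
-- def extract_domain_knowledge(experience_list, degrees):
--     domains = set()
--     if experience_list and isinstance(experience_list, list):
--         for job in experience_list:
--             industry = job.get('company_industry')
--             if industry:
--                 hits = _scan(industry.lower(), _IND_KWS, _IND_LENS)
--                 for pats, tag in INDUSTRY_RULES:
--                     if any(k in hits for k in pats):
--                         domains.add(tag)
--     if degrees and isinstance(degrees, list):
--         degrees_text = ' '.join(str(d).lower() for d in degrees)
--         hits = _scan(degrees_text, _EDU_KWS, _EDU_LENS)
--         for pats, tag in EDU_RULES:
--             if any(k in hits for k in pats):
--                 domains.add(tag)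
--     return list(domains) if domains else ['General']
-- ===== Notes on version B (the rewrite author's own statement) =====
-- stated objective: alternative
-- what changed: Instead of running an independent substring search for each hard-coded keyword, B scans each text once with a sliding window, looking every window up in a precomputed hash set of keywords, and then derives tags from the resulting matched-keyword set via declarative rule tables.
import Mathlib
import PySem

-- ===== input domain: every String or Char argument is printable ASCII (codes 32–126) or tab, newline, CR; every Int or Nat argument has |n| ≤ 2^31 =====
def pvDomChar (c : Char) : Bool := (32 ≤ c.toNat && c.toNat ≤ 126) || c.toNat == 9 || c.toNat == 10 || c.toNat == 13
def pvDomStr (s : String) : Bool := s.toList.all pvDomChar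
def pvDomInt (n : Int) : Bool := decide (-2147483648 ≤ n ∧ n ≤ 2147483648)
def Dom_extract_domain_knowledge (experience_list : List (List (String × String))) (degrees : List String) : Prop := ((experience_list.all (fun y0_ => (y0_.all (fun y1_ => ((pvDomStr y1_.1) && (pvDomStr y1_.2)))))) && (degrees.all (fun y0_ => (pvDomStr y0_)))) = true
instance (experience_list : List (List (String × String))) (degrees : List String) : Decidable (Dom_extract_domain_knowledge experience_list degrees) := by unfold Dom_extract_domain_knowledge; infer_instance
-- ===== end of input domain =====

-- B replaces A's per-keyword substring searches by one sliding-window scan per text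
-- looking each window up in a precomputed keyword set (alternative algorithm, same result).

-- ===== PORT A =====
-- Per-job if-ladder of A, on the lowercased industry string.
def pvIndLadder (s : PySem.Set String) (t : String) : PySem.Set String :=
  let s := if PySem.Str.isIn "software" t || PySem.Str.isIn "technology" t then PySem.Set.add s "Technology" else s
  let s := if PySem.Str.isIn "financial" t || PySem.Str.isIn "bank" t then PySem.Set.add s "FinTech" else s
  let s := if PySem.Str.isIn "healthcare" t || PySem.Str.isIn "medical" t || PySem.Str.isIn "pharma" t then PySem.Set.add s "Healthcare" else s
  let s := if PySem.Str.isIn "e-learning" t || PySem.Str.isIn "education" t then PySem.Set.add s "EdTech" else s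
  let s := if PySem.Str.isIn "retail" t || PySem.Str.isIn "e-commerce" t || PySem.Str.isIn "consumer" t then PySem.Set.add s "E-commerce & Retail" else s
  let s := if PySem.Str.isIn "entertainment" t || PySem.Str.isIn "media" t then PySem.Set.add s "Media & Entertainment" else s
  let s := if PySem.Str.isIn "consulting" t then PySem.Set.add s "Consulting" else s
  let s := if PySem.Str.isIn "manufacturing" t || PySem.Str.isIn "industrial" t then PySem.Set.add s "Manufacturing" else s
  s

-- Education if-ladder of A, on the joined lowercased degrees text.
def pvEduLadder (s : PySem.Set String) (t : String) : PySem.Set String :=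
  let s := if PySem.Str.isIn "business" t || PySem.Str.isIn "mba" t then PySem.Set.add s "Business Management" else s
  let s := if PySem.Str.isIn "engineering" t then PySem.Set.add s "Engineering" else s
  let s := if PySem.Str.isIn "computer" t || PySem.Str.isIn "software" t then PySem.Set.add s "Computer Science" else s
  let s := if PySem.Str.isIn "data" t || PySem.Str.isIn "analytics" t then PySem.Set.add s "Data Science" else s
  let s := if PySem.Str.isIn "design" t then PySem.Set.add s "Design" else s
  s

def extract_domain_knowledge (experience_list : List (List (String × String))) (degrees : List String) : List String :=
  let domains : PySem.Set String := PySem.Set.empty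
  let domains :=
    if experience_list = [] then domains else
      experience_list.foldl (fun s job =>
        match PySem.Dict.get? (PySem.Dict.mk job) "company_industry" with
        | none => s
        | some industry =>
          if industry = "" then s else pvIndLadder s (PySem.Str.lower industry)) domains
  let domains :=
    if degrees = [] then domains else
      pvEduLadder domains (PySem.Str.join " " (degrees.map (fun d => PySem.Str.lower d)))
  if domains = [] then ["General"] else domains

-- ===== PORT B =====
def pvIndustryRules : List (List String × String) :=
  [ (["software", "technology"], "Technology"),
    (["financial", "bank"], "FinTech"),
    (["healthcare", "medical", "pharma"], "Healthcare"),
    (["e-learning", "education"], "EdTech"),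
    (["retail", "e-commerce", "consumer"], "E-commerce & Retail"),
    (["entertainment", "media"], "Media & Entertainment"),
    (["consulting"], "Consulting"),
    (["manufacturing", "industrial"], "Manufacturing") ]

def pvEduRules : List (List String × String) :=
  [ (["business", "mba"], "Business Management"),
    (["engineering"], "Engineering"),
    (["computer", "software"], "Computer Science"),
    (["data", "analytics"], "Data Science"),
    (["design"], "Design") ]

-- _keyword_index: the distinct keywords of a rule table and the sorted distinct lengths
def pvKeywordSet (rules : List (List String × String)) : PySem.Set (List Char) :=
  PySem.Set.ofList (rules.flatMap (fun r => r.1.map String.toList))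
def pvLengthList (kws : PySem.Set (List Char)) : List Int :=
  PySem.List.sorted (PySem.Set.ofList ((kws : List (List Char)).map (fun k => (k.length : Int)))) (fun x => x) false

def pvIndKws : PySem.Set (List Char) := pvKeywordSet pvIndustryRules
def pvIndLens : List Int := pvLengthList pvIndKws
def pvEduKws : PySem.Set (List Char) := pvKeywordSet pvEduRules
def pvEduLens : List Int := pvLengthList pvEduKws

-- _scan: the set of keywords occurring in text, by one sliding-window pass with set lookup
def pvScan (t : List Char) (kws : PySem.Set (List Char)) (lengths : List Int) : PySem.Set (List Char) :=
  PySem.Set.ofList ((List.range t.length).flatMap (fun (i : Nat) =>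
    lengths.flatMap (fun L =>
      let w := PySem.List.slice t (some (i : Int)) (some ((i : Int) + L))
      if PySem.Set.contains kws w then [w] else [])))

-- tag pass: add the tag of every rule one of whose keywords was hit
def pvApplyTags (rules : List (List String × String)) (hits : PySem.Set (List Char)) (s : PySem.Set String) : PySem.Set String :=
  rules.foldl (fun s r => if r.1.any (fun k => PySem.Set.contains hits k.toList) then PySem.Set.add s r.2 else s) s

def extract_domain_knowledge_alt (experience_list : List (List (String × String))) (degrees : List String) : List String :=
  let domains : PySem.Set String := PySem.Set.empty
  let domains :=
    if experience_list = [] then domains else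
      experience_list.foldl (fun s job =>
        match PySem.Dict.get? (PySem.Dict.mk job) "company_industry" with
        | none => s
        | some industry =>
          if industry = "" then s else
            pvApplyTags pvIndustryRules (pvScan (PySem.Str.lower industry).toList pvIndKws pvIndLens) s) domains
  let domains :=
    if degrees = [] then domains else
      pvApplyTags pvEduRules
        (pvScan (PySem.Str.join " " (degrees.map (fun d => PySem.Str.lower d))).toList pvEduKws pvEduLens) domains
  if domains = [] then ["General"] else domains

-- ===== PRECONDITION & SPEC =====
def Spec_extract_domain_knowledge (experience_list : List (List (String × String))) (degrees : List String) (out : List String) : Prop := out = extract_domain_knowledge_alt experience_list degrees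
instance (experience_list : List (List (String × String))) (degrees : List String) (out : List String) : Decidable (Spec_extract_domain_knowledge experience_list degrees out) := by unfold Spec_extract_domain_knowledge; infer_instance

-- ===== CLAIM (what is proved, stated in full; the proofs are below) =====
def Claim_equal_extract_domain_knowledge : Prop := ∀ (experience_list : List (List (String × String))) (degrees : List String), Dom_extract_domain_knowledge experience_list degrees → Spec_extract_domain_knowledge experience_list degrees (extract_domain_knowledge experience_list degrees)

-- ===== LEMMAS AND PROOFS =====

-- membership in the scan result ↔ the keyword is an infix of the text
lemma pvScan_contains (t : List Char) (kws : PySem.Set (List Char)) (lengths : List Int)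
    (hpos : ∀ L ∈ lengths, 0 ≤ L)
    (k : List Char) (hk : PySem.Set.contains kws k = true)
    (hlen : ((k.length : Int)) ∈ lengths) (hne : k ≠ []) :
    PySem.Set.contains (pvScan t kws lengths) k = PySem.Chars.isIn k t := by
  rw [show ∀ (a b : Bool), (a = b) ↔ ((a = true) ↔ (b = true)) from by decide]
  rw [PySem.Set.contains_iff, ← PySem.Chars.exists_prefix_drop_iff_isIn]
  unfold pvScan
  simp only [PySem.Set.mem_ofList, List.mem_flatMap, List.mem_range,
    List.mem_ite_nil_right, List.mem_singleton]
  constructor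
  · rintro ⟨i, hi, L, hL, hc, hkw⟩
    refine ⟨i, ?_⟩
    subst hkw
    rw [PySem.List.slice_toNat t (Int.natCast_nonneg i) (by have := hpos L hL; omega)]
    exact (List.take_prefix _ _)
  · rintro ⟨j, hj⟩
    have hjlt : j < t.length := by
      by_contra h
      have hd : t.drop j = [] := List.drop_eq_nil_of_le (by omega)
      rw [hd] at hj
      exact hne (List.prefix_nil.mp hj)
    have hsl : PySem.List.slice t (some (j : Int)) (some ((j : Int) + (k.length : Int))) = k := by
      rw [show ((j : Int) + (k.length : Int)) = (((j + k.length : Nat) : Int)) by push_cast; ring,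
          PySem.List.slice_natCast, show j + k.length - j = k.length by omega]
      exact (List.prefix_iff_eq_take.mp hj).symm
    exact ⟨j, hjlt, (k.length : Int), hlen, by rw [hsl]; exact ⟨hk, rfl⟩⟩

-- scan-set lookup of an industry keyword is exactly A's substring test
lemma pvIndHit (t k : String) (hk : PySem.Set.contains pvIndKws k.toList = true)
    (hlen : ((k.toList.length : Int)) ∈ pvIndLens) (hne : k.toList ≠ []) :
    PySem.Set.contains (pvScan t.toList pvIndKws pvIndLens) k.toList = PySem.Str.isIn k t := by
  rw [PySem.Str.isIn_eq]
  exact pvScan_contains _ _ _ (by decide) _ hk hlen hne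

-- scan-set lookup of an education keyword is exactly A's substring test
lemma pvEduHit (t k : String) (hk : PySem.Set.contains pvEduKws k.toList = true)
    (hlen : ((k.toList.length : Int)) ∈ pvEduLens) (hne : k.toList ≠ []) :
    PySem.Set.contains (pvScan t.toList pvEduKws pvEduLens) k.toList = PySem.Str.isIn k t := by
  rw [PySem.Str.isIn_eq]
  exact pvScan_contains _ _ _ (by decide) _ hk hlen hne

-- per-text agreement of the two industry passes
lemma pvInd_eq (s : PySem.Set String) (t : String) :
    pvApplyTags pvIndustryRules (pvScan t.toList pvIndKws pvIndLens) s = pvIndLadder s t := by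
  simp only [pvApplyTags, pvIndustryRules, List.foldl_cons, List.foldl_nil,
    List.any_cons, List.any_nil, Bool.or_false]
  rw [pvIndHit t "software" (by decide) (by decide) (by decide),
      pvIndHit t "technology" (by decide) (by decide) (by decide),
      pvIndHit t "financial" (by decide) (by decide) (by decide),
      pvIndHit t "bank" (by decide) (by decide) (by decide),
      pvIndHit t "healthcare" (by decide) (by decide) (by decide),
      pvIndHit t "medical" (by decide) (by decide) (by decide),
      pvIndHit t "pharma" (by decide) (by decide) (by decide),
      pvIndHit t "e-learning" (by decide) (by decide) (by decide),
      pvIndHit t "education" (by decide) (by decide) (by decide),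
      pvIndHit t "retail" (by decide) (by decide) (by decide),
      pvIndHit t "e-commerce" (by decide) (by decide) (by decide),
      pvIndHit t "consumer" (by decide) (by decide) (by decide),
      pvIndHit t "entertainment" (by decide) (by decide) (by decide),
      pvIndHit t "media" (by decide) (by decide) (by decide),
      pvIndHit t "consulting" (by decide) (by decide) (by decide),
      pvIndHit t "manufacturing" (by decide) (by decide) (by decide),
      pvIndHit t "industrial" (by decide) (by decide) (by decide)]
  simp only [pvIndLadder, Bool.or_assoc]

-- per-text agreement of the two education passes
lemma pvEdu_eq (s : PySem.Set String) (t : String) :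
    pvApplyTags pvEduRules (pvScan t.toList pvEduKws pvEduLens) s = pvEduLadder s t := by
  simp only [pvApplyTags, pvEduRules, List.foldl_cons, List.foldl_nil,
    List.any_cons, List.any_nil, Bool.or_false]
  rw [pvEduHit t "business" (by decide) (by decide) (by decide),
      pvEduHit t "mba" (by decide) (by decide) (by decide),
      pvEduHit t "engineering" (by decide) (by decide) (by decide),
      pvEduHit t "computer" (by decide) (by decide) (by decide),
      pvEduHit t "software" (by decide) (by decide) (by decide),
      pvEduHit t "data" (by decide) (by decide) (by decide),
      pvEduHit t "analytics" (by decide) (by decide) (by decide),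
      pvEduHit t "design" (by decide) (by decide) (by decide)]
  simp only [pvEduLadder]

-- ===== VERDICT (by name: the statement is the Claim_ definition above) =====
theorem extract_domain_knowledge_spec : Claim_equal_extract_domain_knowledge := by
  intro el dg _
  show _ = extract_domain_knowledge_alt el dg
  unfold extract_domain_knowledge extract_domain_knowledge_alt
  simp only [pvInd_eq, pvEdu_eq]
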